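-- pv_equiv track=rewrite | github.com/kolyadub/python-assignment-1 | similarity_module.py | common_movies_ratings
-- ===== SOURCE A (Python) =====
-- def common_movies(userPreferences, user1, user2):
--     # This function finds common movies of two users
--     intersect = []
--     for movie in userPreferences[user1]:
--         if movie in userPreferences[user2]:
--             intersect.append(movie)
--     return intersect
--
-- def common_movies_ratings(userPreferences, user1, user2):
--     # This fuction returns 2 lists with ratings of user1 and user2 accordingly
--     user1Rating = []
--     user2Rating = []
--
--     commonMovies = common_movies(userPreferences, user1, user2)
--
--     # Picking ratings of common movies for both users
--     for movie in range(len(commonMovies)):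
--         user1Rating.append(int(userPreferences[user1][commonMovies[movie]]))
--         user2Rating.append(int(userPreferences[user2][commonMovies[movie]]))
--     return user1Rating, user2Rating
-- ===== SOURCE B (Python) =====
-- def common_movies_ratings(userPreferences, user1, user2):
--     # single pass over user1's items; no intermediate common-movies list
--     user1Rating = []
--     user2Rating = []
--     for movie, rating in userPreferences[user1].items():
--         r2 = userPreferences[user2].get(movie)
--         if r2 is not None:
--             user1Rating.append(int(rating))
--             user2Rating.append(int(r2))
--     return user1Rating, user2Rating
-- ===== Notes on version B (the rewrite author's own statement) =====
-- stated objective: simpler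
-- what changed: Replaces the helper that materializes the common-movies list plus a second index-based loop with a single pass over user1's (movie, rating) items using dict.get on user2's dict.
import Mathlib
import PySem

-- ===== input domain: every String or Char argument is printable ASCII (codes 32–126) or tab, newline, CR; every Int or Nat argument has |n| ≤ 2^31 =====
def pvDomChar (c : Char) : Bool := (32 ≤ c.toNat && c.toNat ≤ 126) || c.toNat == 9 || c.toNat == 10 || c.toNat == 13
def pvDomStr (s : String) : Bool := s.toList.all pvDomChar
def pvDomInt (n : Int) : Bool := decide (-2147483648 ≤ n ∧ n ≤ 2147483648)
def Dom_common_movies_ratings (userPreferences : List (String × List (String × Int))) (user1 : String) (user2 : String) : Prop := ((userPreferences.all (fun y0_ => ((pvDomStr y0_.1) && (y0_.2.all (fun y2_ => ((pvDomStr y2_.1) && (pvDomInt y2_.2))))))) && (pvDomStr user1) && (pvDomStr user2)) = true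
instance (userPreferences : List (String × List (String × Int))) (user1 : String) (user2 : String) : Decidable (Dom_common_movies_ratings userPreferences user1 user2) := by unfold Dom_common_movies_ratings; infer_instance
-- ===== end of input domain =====

-- B replaces A's intersection helper + second index loop with one pass over user1's items (objective: simpler).

-- ===== PORT A =====
-- helper common_movies: 'for movie in userPreferences[user1]: if movie in userPreferences[user2]: intersect.append(movie)'
def common_movies_port (d1 d2 : PySem.Dict String Int) : List String :=
  d1.keys.foldl (fun intersect movie => if d2.contains movie then intersect ++ [movie] else intersect) []

def common_movies_ratings (userPreferences : List (String × List (String × Int))) (user1 : String) (user2 : String) : List Int × List Int :=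
  -- userPreferences is a Python dict of dicts: build it with PySem.Dict (last value wins, first position kept)
  let d := PySem.Dict.ofList (userPreferences.map (fun p => (p.1, PySem.Dict.ofList p.2)))
  match d.get? user1, d.get? user2 with
  | some d1, some d2 =>
      let commonMovies := common_movies_port d1 d2
      -- 'for movie in range(len(commonMovies)): append int(d1[cm[movie]]); append int(d2[cm[movie]])'
      -- index is always in range and the key always present, so pyGetD/getD are exact here
      (PySem.List.pyRange 0 (PySem.List.len commonMovies) 1).foldl
        (fun acc movie =>
          (acc.1 ++ [d1.getD (PySem.List.pyGetD commonMovies movie "") 0],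
           acc.2 ++ [d2.getD (PySem.List.pyGetD commonMovies movie "") 0]))
        ([], [])
  | _, _ => ([], [])   -- unreachable under Pre_ (Python raises KeyError)

-- ===== PORT B =====
def common_movies_ratings_alt (userPreferences : List (String × List (String × Int))) (user1 : String) (user2 : String) : List Int × List Int :=
  -- the same Python dict-of-dicts input, built with PySem.Dict
  let d := PySem.Dict.ofList (userPreferences.map (fun p => (p.1, PySem.Dict.ofList p.2)))
  match d.get? user1 with
  | none => ([], [])   -- unreachable under Pre_ (Python raises KeyError)
  | some d1 =>
    match d.get? user2 with
    | none => ([], [])   -- under Pre_ reachable only with d1 empty (loop never runs); otherwise Python raises KeyError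
    | some d2 =>
      -- 'for movie, rating in d1.items(): r2 = d2.get(movie); if r2 is not None: append'
      d1.items.foldl
        (fun acc p =>
          match d2.get? p.1 with
          | some r2 => (acc.1 ++ [p.2], acc.2 ++ [r2])
          | none => acc)
        ([], [])

-- ===== PRECONDITION & SPEC =====
-- Pre_: exactly where Python A returns — user1 is a key, and user2 is a key or user1's dict is
-- empty (then A's loops never touch userPreferences[user2]); otherwise A raises KeyError.
def Pre_common_movies_ratings (userPreferences : List (String × List (String × Int))) (user1 : String) (user2 : String) : Prop :=
  user1 ∈ userPreferences.map Prod.fst ∧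
  (user2 ∈ userPreferences.map Prod.fst ∨
   ((userPreferences.reverse.find? (fun p => p.1 == user1)).any (fun p => p.2.isEmpty)) = true)
instance (userPreferences : List (String × List (String × Int))) (user1 : String) (user2 : String) : Decidable (Pre_common_movies_ratings userPreferences user1 user2) := by unfold Pre_common_movies_ratings; infer_instance

def pvWitness_common_movies_ratings : (List (String × List (String × Int))) × String × String :=
  ([("a", [("m", 3), ("x", 1)]), ("b", [("m", 5)])], "a", "b")

def Spec_common_movies_ratings (userPreferences : List (String × List (String × Int))) (user1 : String) (user2 : String) (out : List Int × List Int) : Prop := out = common_movies_ratings_alt userPreferences user1 user2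
instance (userPreferences : List (String × List (String × Int))) (user1 : String) (user2 : String) (out : List Int × List Int) : Decidable (Spec_common_movies_ratings userPreferences user1 user2 out) := by unfold Spec_common_movies_ratings; infer_instance

-- ===== CLAIM (what is proved, stated in full; the proofs are below) =====
def Claim_equal_common_movies_ratings : Prop := ∀ (userPreferences : List (String × List (String × Int))) (user1 : String) (user2 : String), Dom_common_movies_ratings userPreferences user1 user2 → Pre_common_movies_ratings userPreferences user1 user2 → Spec_common_movies_ratings userPreferences user1 user2 (common_movies_ratings userPreferences user1 user2)

-- ===== LEMMAS AND PROOFS =====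

theorem pv_witness_ok : Dom_common_movies_ratings (pvWitness_common_movies_ratings.1) (pvWitness_common_movies_ratings.2.1) (pvWitness_common_movies_ratings.2.2) ∧ Pre_common_movies_ratings (pvWitness_common_movies_ratings.1) (pvWitness_common_movies_ratings.2.1) (pvWitness_common_movies_ratings.2.2) := by decide

-- any value returned by get? is among the dict's values
theorem pv_mem_values_of_get? {κ ν : Type} [BEq κ] (d : PySem.Dict κ ν) (k : κ) (v : ν)
    (h : d.get? k = some v) : v ∈ d.values := by
  unfold PySem.Dict.get? at h
  rcases Option.map_eq_some_iff.mp h with ⟨p, hp, rfl⟩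
  have := List.mem_of_find?_eq_some hp
  simp [PySem.Dict.values]
  exact ⟨p.1, this⟩

-- values surviving an update come from the old dict or the inserted pairs
theorem pv_mem_values_update {κ ν : Type} [BEq κ] [LawfulBEq κ]
    (ps : List (κ × ν)) (d : PySem.Dict κ ν) (w : ν)
    (h : w ∈ (d.update ps).values) : w ∈ d.values ∨ w ∈ ps.map (·.2) := by
  induction ps generalizing d with
  | nil => exact Or.inl h
  | cons p ps ih =>
    have h' : w ∈ ((d.insert p.1 p.2).update ps).values := h
    rcases ih (d.insert p.1 p.2) h' with h2 | h2
    · rcases PySem.Dict.mem_values_insert d p.1 p.2 w h2 with rfl | h3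
      · exact Or.inr (by simp)
      · exact Or.inl h3
    · exact Or.inr (by simp; right; simpa using h2)

theorem pv_mem_values_ofList {κ ν : Type} [BEq κ] [LawfulBEq κ]
    (ps : List (κ × ν)) (w : ν) (h : w ∈ (PySem.Dict.ofList ps).values) : w ∈ ps.map (·.2) := by
  rcases pv_mem_values_update ps PySem.Dict.empty w h with h2 | h2
  · simp [PySem.Dict.empty, PySem.Dict.values] at h2
  · exact h2

-- every inner dict stored in the outer PySem.Dict has nodup keys
theorem pv_inner_nodup (userPreferences : List (String × List (String × Int))) (u : String)
    (d1 : PySem.Dict String Int)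
    (h : (PySem.Dict.ofList (userPreferences.map (fun p => (p.1, PySem.Dict.ofList p.2)))).get? u = some d1) :
    d1.keys.Nodup := by
  have hv := pv_mem_values_of_get? _ _ _ h
  have := pv_mem_values_ofList _ _ hv
  simp [List.map_map, Function.comp] at this
  obtain ⟨a, b, -, rfl⟩ := this
  exact PySem.Dict.nodup_keys_ofList b

-- core: A's fold over the filtered key list equals B's single fold over the items
theorem pv_core (d1 d2 : PySem.Dict String Int) (hn : d1.keys.Nodup)
    (l : List (String × Int)) (acc : List Int × List Int)
    (hl : ∀ p ∈ l, p ∈ d1.items) :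
    ((l.filter (fun p => d2.contains p.1)).map (·.1)).foldl
        (fun acc m => (acc.1 ++ [d1.getD m 0], acc.2 ++ [d2.getD m 0])) acc
      = l.foldl
          (fun acc p =>
            match d2.get? p.1 with
            | some r2 => (acc.1 ++ [p.2], acc.2 ++ [r2])
            | none => acc) acc := by
  induction l generalizing acc with
  | nil => rfl
  | cons p l ih =>
    have hp : p ∈ d1.items := hl p (by simp)
    have hl' : ∀ q ∈ l, q ∈ d1.items := fun q hq => hl q (by simp [hq])
    by_cases hc : d2.contains p.1 = true
    · have hs : (d2.get? p.1).isSome := by rw [← PySem.Dict.contains_eq_isSome_get?]; exact hc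
      rcases Option.isSome_iff_exists.mp hs with ⟨r2, hr2⟩
      have hgd2 : d2.getD p.1 0 = r2 := PySem.Dict.getD_of_get?_eq_some d2 0 hr2
      have hgd1 : d1.getD p.1 0 = p.2 := by
        have : (p.1, p.2) ∈ d1.items := by simpa using hp
        exact PySem.Dict.getD_of_mem_items d1 this hn 0
      simp only [List.filter_cons, hc, if_true, List.map_cons, List.foldl_cons, hr2, hgd1, hgd2]
      exact ih _ hl'
    · have hno : d2.get? p.1 = none := by
        rw [PySem.Dict.get?_eq_none_iff_contains]; simpa using hc
      simp only [List.filter_cons, hc, List.foldl_cons, hno]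
      exact ih _ hl'

-- ===== VERDICT (by name: the statement is the Claim_ definition above) =====
theorem common_movies_ratings_spec : Claim_equal_common_movies_ratings := by
  intro up u1 u2 _hdom _hpre
  unfold Spec_common_movies_ratings common_movies_ratings common_movies_ratings_alt
  cases h1 : (PySem.Dict.ofList (up.map (fun p => (p.1, PySem.Dict.ofList p.2)))).get? u1 with
  | none => cases h2 : (PySem.Dict.ofList (up.map (fun p => (p.1, PySem.Dict.ofList p.2)))).get? u2 <;> simp only [h1, h2]
  | some d1 =>
    cases h2 : (PySem.Dict.ofList (up.map (fun p => (p.1, PySem.Dict.ofList p.2)))).get? u2 with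
    | none => simp only [h1, h2]
    | some d2 =>
      simp only [h1, h2]
      have hn : d1.keys.Nodup := pv_inner_nodup up u1 d1 h1
      have hcm : common_movies_port d1 d2 = (d1.items.filter (fun p => d2.contains p.1)).map (·.1) := by
        unfold common_movies_port
        rw [PySem.List.foldl_append_if_eq_filter]
        show List.filter (fun m => d2.contains m) (d1.items.map (·.1)) = _
        rw [List.filter_map]
        rfl
      rw [PySem.List.foldl_pyRange_zero_pyGetD (common_movies_port d1 d2) ""
            (fun acc m => (acc.1 ++ [d1.getD m 0], acc.2 ++ [d2.getD m 0])) ([], [])]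
      rw [hcm]
      exact pv_core d1 d2 hn d1.items ([], []) (fun p hp => hp)
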